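-- pv_equiv track=rewrite | github.com/RMANOV/HackerRankRuslanManov | zoo.py | is_similar_to_zoo
-- ===== SOURCE A (Python) =====
-- def is_similar_to_zoo(word):
--     z_count = 0
--     o_count = 0
--
--     for char in word:
--         if char == 'z':
--             z_count += 1
--         elif char == 'o':
--             o_count += 1
--         else:
--             return False
--
--     return o_count == 2 * z_count
-- ===== SOURCE B (Python) =====
-- def is_similar_to_zoo(word):
--     n = len(word)
--     if n % 3 != 0:
--         return False
--     k = n // 3
--     return sorted(word) == ['o'] * (2 * k) + ['z'] * k
-- ===== Notes on version B (the rewrite author's own statement) =====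
-- stated objective: alternative
-- what changed: Replaces A's single-pass counting loop with early exit by a canonical-form check: the length must be divisible by 3 and the sorted character list must equal the unique sorted valid word ['o']*(2k)+['z']*k, so no counters and no per-character branching exist in B.
import Mathlib
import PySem

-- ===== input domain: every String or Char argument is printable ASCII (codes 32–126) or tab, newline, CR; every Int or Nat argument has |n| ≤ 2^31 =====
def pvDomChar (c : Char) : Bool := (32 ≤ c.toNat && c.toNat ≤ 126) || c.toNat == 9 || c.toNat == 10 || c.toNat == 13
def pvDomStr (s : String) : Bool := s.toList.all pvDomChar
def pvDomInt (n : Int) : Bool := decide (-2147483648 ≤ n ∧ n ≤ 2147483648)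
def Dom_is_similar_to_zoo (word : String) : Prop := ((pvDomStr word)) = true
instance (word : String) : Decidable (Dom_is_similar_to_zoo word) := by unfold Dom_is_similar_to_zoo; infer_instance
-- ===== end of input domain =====

-- B replaces A's single-pass counting loop by a canonical-form check: length
-- divisible by 3, and the sorted word equals ['o']*(2k)+['z']*k (objective: alternative).

-- ===== PORT A =====
-- the for-loop over the characters with the two counters and the early 'return False'
def zooLoopA : List Char → Int → Int → Bool
  | [], z_count, o_count => o_count == 2 * z_count
  | c :: cs, z_count, o_count =>
      if c == 'z' then zooLoopA cs (z_count + 1) o_count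
      else if c == 'o' then zooLoopA cs z_count (o_count + 1)
      else false

def is_similar_to_zoo (word : String) : Bool := zooLoopA word.toList 0 0

-- ===== PORT B =====
-- n = len(word) is nonnegative, so Nat '%' and '/' agree with Python's '%' and '//'
def is_similar_to_zoo_alt (word : String) : Bool :=
  let n := word.toList.length
  if n % 3 ≠ 0 then false
  else
    let k := n / 3
    PySem.List.sorted word.toList (fun c => c) false
      == List.replicate (2 * k) 'o' ++ List.replicate k 'z'

-- ===== PRECONDITION & SPEC =====
def Spec_is_similar_to_zoo (word : String) (out : Bool) : Prop := out = is_similar_to_zoo_alt word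
instance (word : String) (out : Bool) : Decidable (Spec_is_similar_to_zoo word out) := by unfold Spec_is_similar_to_zoo; infer_instance

-- ===== CLAIM (what is proved, stated in full; the proofs are below) =====
def Claim_equal_is_similar_to_zoo : Prop := ∀ (word : String), Dom_is_similar_to_zoo word → Spec_is_similar_to_zoo word (is_similar_to_zoo word)

-- ===== LEMMAS AND PROOFS =====
-- A's loop, run from any counter state, equals: all characters allowed, and the
-- final counter comparison.
theorem zooLoopA_eq (cs : List Char) : ∀ (z o : Int),
    zooLoopA cs z o =
      (decide (∀ c ∈ cs, c = 'o' ∨ c = 'z')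
        && decide (o + (cs.count 'o' : Int) = 2 * (z + (cs.count 'z' : Int)))) := by
  induction cs with
  | nil =>
    intro z o
    by_cases h : o = 2 * z <;> simp [zooLoopA, h]
  | cons c cs ih =>
    intro z o
    by_cases hz : c = 'z'
    · subst hz
      simp [zooLoopA, ih]
      congr 1
      rw [decide_eq_decide]
      omega
    · by_cases ho : c = 'o'
      · subst ho
        simp [zooLoopA, hz, ih]
        congr 1
        rw [decide_eq_decide]
        omega
      · simp [zooLoopA, hz, ho]

-- the canonical word is sorted (Pairwise ≤)
theorem canon_pairwise (m k : Nat) :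
    (List.replicate m 'o' ++ List.replicate k 'z').Pairwise (· ≤ ·) := by
  rw [List.pairwise_append]
  refine ⟨List.pairwise_replicate.2 (by simp), List.pairwise_replicate.2 (by simp), ?_⟩
  intro a ha b hb
  rw [List.eq_of_mem_replicate ha, List.eq_of_mem_replicate hb]
  decide

-- sorted(word) equals the canonical word iff word is a permutation of it
theorem sorted_eq_canon_iff (l : List Char) (m k : Nat) :
    PySem.List.sorted l (fun c => c) false
        = List.replicate m 'o' ++ List.replicate k 'z'
      ↔ l.Perm (List.replicate m 'o' ++ List.replicate k 'z') := by
  constructor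
  · intro h
    exact (h ▸ PySem.List.sorted_perm l (fun c => c) false).symm
  · intro h
    exact PySem.List.sorted_id_eq_of_perm_of_pairwise _ _ h.symm (canon_pairwise m k)

-- on a word with only 'o'/'z' characters the two counts sum to the length
theorem count_sum_of_subset (l : List Char) (h : ∀ c ∈ l, c = 'o' ∨ c = 'z') :
    l.count 'o' + l.count 'z' = l.length := by
  induction l with
  | nil => simp
  | cons c cs ih =>
    have hc := h c (by simp)
    have ih' := ih (fun x hx => h x (by simp [hx]))
    rcases hc with hc | hc <;> subst hc <;>
      simp <;> omega

-- ===== VERDICT (by name: the statement is the Claim_ definition above) =====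
theorem is_similar_to_zoo_spec : Claim_equal_is_similar_to_zoo := by
  intro word _
  unfold Spec_is_similar_to_zoo is_similar_to_zoo is_similar_to_zoo_alt
  set l := word.toList with hl
  rw [zooLoopA_eq]
  show _ = (if l.length % 3 ≠ 0 then false
            else (PySem.List.sorted l (fun c => c) false
               == List.replicate (2 * (l.length / 3)) 'o' ++ List.replicate (l.length / 3) 'z'))
  rw [Bool.eq_iff_iff]
  by_cases h3 : l.length % 3 = 0
  · rw [if_neg (by omega : ¬ l.length % 3 ≠ 0)]
    rw [beq_iff_eq, Bool.and_eq_true, decide_eq_true_eq, decide_eq_true_eq,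
        sorted_eq_canon_iff,
        List.perm_replicate_append_replicate (by decide : 'o' ≠ 'z')]
    constructor
    · rintro ⟨hv, hc⟩
      have hsum := count_sum_of_subset l hv
      refine ⟨by omega, by omega, ?_⟩
      intro c hc'
      rcases hv c hc' with h | h <;> simp [h]
    · rintro ⟨ho, hz, hsub⟩
      have hv : ∀ c ∈ l, c = 'o' ∨ c = 'z' := by
        intro c hc'
        have := hsub hc'
        simp at this
        tauto
      have hsum := count_sum_of_subset l hv
      exact ⟨hv, by omega⟩
  · rw [if_pos (by omega : l.length % 3 ≠ 0)]
    rw [Bool.and_eq_true, decide_eq_true_eq, decide_eq_true_eq]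
    constructor
    · rintro ⟨hv, hc⟩
      have hsum := count_sum_of_subset l hv
      exfalso; apply h3; omega
    · intro h; exact absurd h (by simp)
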